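-- pv_equiv track=rewrite | github.com/cscott/StringMaze | maze.py | _delete
-- ===== SOURCE A (Python) =====
-- def _delete(result, entry):
--     if len(entry)==0:
--         yield result
--         return
--     if len(result)==0:
--         return
--     if result[0]==entry[0]:
--         for x in _delete(result[1:], entry[1:]):
--             yield x
--     for x in _delete(result[1:], entry):
--         yield result[0] + x
--     return
-- ===== SOURCE B (Python) =====
-- def _delete(result, entry):
--     # Explicit stack-based DFS over states (remaining result, remaining entry, prefix).
--     # Push the 'keep' successor before the 'delete' successor so delete pops (yields) first,
--     # matching the recursive generator's delete-before-keep order.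
--     stack = [(result, entry, '')]
--     while stack:
--         r, e, pre = stack.pop()
--         if not e:
--             yield pre + r
--         elif r:
--             stack.append((r[1:], e, pre + r[0]))
--             if r[0] == e[0]:
--                 stack.append((r[1:], e[1:], pre))
-- ===== Notes on version B (the rewrite author's own statement) =====
-- stated objective: alternative
-- what changed: The recursive generator is replaced by an iterative DFS over an explicit stack of (remaining-result, remaining-entry, prefix) states, pushing the keep successor before the delete successor so outputs appear in the same order.
import Mathlib
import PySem

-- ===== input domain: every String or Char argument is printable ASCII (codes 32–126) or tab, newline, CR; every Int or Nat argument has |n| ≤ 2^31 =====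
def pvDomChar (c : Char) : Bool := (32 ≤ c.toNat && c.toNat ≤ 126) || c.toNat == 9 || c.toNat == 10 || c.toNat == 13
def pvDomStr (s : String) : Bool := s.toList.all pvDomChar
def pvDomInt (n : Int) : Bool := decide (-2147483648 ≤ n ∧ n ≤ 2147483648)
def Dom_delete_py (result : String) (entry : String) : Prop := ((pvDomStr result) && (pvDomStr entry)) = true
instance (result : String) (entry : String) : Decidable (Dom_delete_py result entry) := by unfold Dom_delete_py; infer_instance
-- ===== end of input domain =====

-- B is an iterative explicit-stack DFS replacing A's recursive generator; same outputs, same order.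

-- termination helpers for delB's stack measure (cited by the port's decreasing_by)
theorem pvMeas1 (n s : Nat) : 3 ^ n + (3 ^ n + s) < 3 ^ (n + 1) + s := by
  have h : 0 < 3 ^ n := Nat.pow_pos (by norm_num)
  simp only [pow_succ]; omega
theorem pvMeas2 (n s : Nat) : 3 ^ n + s < 3 ^ (n + 1) + s := by
  have h : 0 < 3 ^ n := Nat.pow_pos (by norm_num)
  simp only [pow_succ]; omega
theorem pvMeas3 (n s : Nat) : s < 3 ^ n + s := by
  have h : 0 < 3 ^ n := Nat.pow_pos (by norm_num)
  omega

-- ===== PORT A =====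
-- A's recursion on the strings, over List Char (strings are ported via toList; result[1:] = tail, result[0] + x = cons).
def delA : List Char → List Char → List (List Char)
  | r, [] => [r]                                  -- if len(entry)==0: yield result; return
  | [], _ :: _ => []                              -- if len(result)==0: return
  | r0 :: rt, e0 :: et =>
      (if r0 == e0 then delA rt et else []) ++    -- if result[0]==entry[0]: yield from _delete(result[1:], entry[1:])
      (delA rt (e0 :: et)).map (r0 :: ·)          -- yield result[0] + x for x in _delete(result[1:], entry)

def delete_py (result : String) (entry : String) : List String :=
  (delA result.toList entry.toList).map String.ofList

-- ===== PORT B =====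
-- Source B's while-loop over the explicit stack of states (remaining result, remaining entry, prefix).
def delB : List (List Char × List Char × List Char) → List (List Char)
  | [] => []
  | (r, e, pre) :: rest =>
    match e, r with
    | [], _ => (pre ++ r) :: delB rest                          -- if not e: yield pre + r
    | _ :: _, [] => delB rest                                   -- elif r: (else: discard)
    | e0 :: et, r0 :: rt =>
      if r0 == e0 then
        delB ((rt, et, pre) :: (rt, e0 :: et, pre ++ [r0]) :: rest)   -- push keep, then delete (delete pops first)
      else
        delB ((rt, e0 :: et, pre ++ [r0]) :: rest)
  termination_by st => (st.map (fun s => 3 ^ s.1.length)).sum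
  decreasing_by all_goals
    simp only [List.map_cons, List.sum_cons, List.length_cons]
    first | exact pvMeas1 _ _ | exact pvMeas2 _ _ | exact pvMeas3 _ _

def delete_py_alt (result : String) (entry : String) : List String :=
  (delB [(result.toList, entry.toList, [])]).map String.ofList

-- ===== PRECONDITION & SPEC =====
def Spec_delete_py (result : String) (entry : String) (out : List String) : Prop := out = delete_py_alt result entry
instance (result : String) (entry : String) (out : List String) : Decidable (Spec_delete_py result entry out) := by unfold Spec_delete_py; infer_instance

-- ===== CLAIM (what is proved, stated in full; the proofs are below) =====
def Claim_equal_delete_py : Prop := ∀ (result : String) (entry : String), Dom_delete_py result entry → Spec_delete_py result entry (delete_py result entry)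

-- ===== LEMMAS AND PROOFS =====

-- The stack loop emits, front to back, each state's subtree output prefixed by its accumulated prefix.
theorem delB_flat (st : List (List Char × List Char × List Char)) :
    delB st = st.flatMap (fun s => (delA s.1 s.2.1).map (s.2.2 ++ ·)) := by
  induction st using delB.induct with
  | case1 => simp [delB]
  | case2 rest pre r ih => simp [delB, delA, ih]
  | case3 rest pre e0 et ih => simp [delB, delA, ih]
  | case4 rest pre e0 et r0 rt h ih =>
      simp only [delB, h, if_true, ih, List.flatMap_cons, delA]
      simp [List.map_map, Function.comp_def, List.append_assoc]
  | case5 rest pre e0 et r0 rt h ih =>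
      simp only [delB, h, ih, List.flatMap_cons, delA]
      simp [List.map_map, Function.comp_def, List.append_assoc]

-- ===== VERDICT (by name: the statement is the Claim_ definition above) =====
theorem delete_py_spec : Claim_equal_delete_py := by
  intro result entry _
  unfold Spec_delete_py delete_py delete_py_alt
  simp [delB_flat]
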